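-- pv_equiv track=rewrite | github.com/delacruzchaico/emr_rendering_engine | app/infrastructure/pdf_generator.py | get_imagenes_adicionales
-- ===== SOURCE A (Python) =====
-- def get_imagenes_adicionales(full_imedic_data):
--     """
--     Filtra las imágenes que se repiten por tipo para enviarlas
--     a la página opcional (Página 6).
--     """
--     buffer_adicionales = []
--     stack_tipos_vistos = set() # Usamos un set para búsquedas ultra rápidas O(1)
--
--     for registro in full_imedic_data:
--         tipo_id = registro.get('imedic_tipo_id')
--
--         if tipo_id in stack_tipos_vistos:
--             # Si ya vimos este tipo antes, esta imagen va para la pág 6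
--             buffer_adicionales.append(registro)
--         else:
--             # Si es la primera vez que vemos este tipo, lo marcamos como principal
--             stack_tipos_vistos.add(tipo_id)
--
--     return buffer_adicionales
-- ===== SOURCE B (Python) =====
-- def get_imagenes_adicionales(full_imedic_data):
--     """
--     Two-pass re-implementation: first build a table of the earliest index at
--     which each 'imedic_tipo_id' appears, then keep every record whose position
--     is not one of those first-occurrence indices.
--     """
--     first_index = {}
--     for i, registro in enumerate(full_imedic_data):
--         first_index.setdefault(registro.get('imedic_tipo_id'), i)
--     keep = set(first_index.values())
--     return [registro for i, registro in enumerate(full_imedic_data) if i not in keep]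
-- ===== Notes on version B (the rewrite author's own statement) =====
-- stated objective: alternative
-- what changed: Replaces the on-the-fly seen-set filter by two passes: an index table recording the first occurrence position of each type (via enumerate + setdefault), then a positional filter that drops exactly those first-occurrence indices.
import Mathlib
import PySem

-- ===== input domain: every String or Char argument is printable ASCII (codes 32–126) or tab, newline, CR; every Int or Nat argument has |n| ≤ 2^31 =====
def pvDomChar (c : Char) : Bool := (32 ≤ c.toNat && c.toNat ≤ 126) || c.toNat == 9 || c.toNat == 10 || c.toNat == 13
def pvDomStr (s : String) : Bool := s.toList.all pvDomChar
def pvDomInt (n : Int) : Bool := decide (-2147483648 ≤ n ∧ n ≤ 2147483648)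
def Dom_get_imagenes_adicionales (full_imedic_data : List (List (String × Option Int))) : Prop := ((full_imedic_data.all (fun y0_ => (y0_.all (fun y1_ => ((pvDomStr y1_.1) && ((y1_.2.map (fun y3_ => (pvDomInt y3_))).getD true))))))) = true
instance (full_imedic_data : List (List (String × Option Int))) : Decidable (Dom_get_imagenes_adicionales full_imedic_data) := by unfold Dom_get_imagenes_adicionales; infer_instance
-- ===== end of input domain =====

-- B replaces A's on-the-fly seen-set filter by two passes (first-occurrence index table, then positional filter); same O(n) cost, different decomposition.


-- ===== PORT A =====
-- registro.get('imedic_tipo_id')  (shared helper: the same Python expression occurs in both sources)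
def pvTipo (r : List (String × Option Int)) : Option Int :=
  (PySem.Dict.mk r).getD "imedic_tipo_id" none

def get_imagenes_adicionales (full_imedic_data : List (List (String × Option Int))) : List (List (String × Option Int)) :=
  (full_imedic_data.foldl
    (fun (st : List (List (String × Option Int)) × PySem.Set (Option Int)) registro =>
      let tipo_id := pvTipo registro
      if PySem.Set.contains st.2 tipo_id then
        (st.1 ++ [registro], st.2)
      else
        (st.1, PySem.Set.add st.2 tipo_id))
    ([], PySem.Set.empty)).1

-- ===== PORT B =====
def get_imagenes_adicionales_alt (full_imedic_data : List (List (String × Option Int))) : List (List (String × Option Int)) :=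
  let first_index : PySem.Dict (Option Int) Int :=
    (PySem.List.enumerate full_imedic_data).foldl
      (fun d p => PySem.Dict.setdefault d (pvTipo p.2) p.1) PySem.Dict.empty
  let keep : PySem.Set Int := PySem.Set.ofList (PySem.Dict.values first_index)
  (PySem.List.enumerate full_imedic_data).foldl
    (fun acc p => if !(PySem.Set.contains keep p.1) then acc ++ [p.2] else acc) []

-- ===== PRECONDITION & SPEC =====
def Spec_get_imagenes_adicionales (full_imedic_data : List (List (String × Option Int))) (out : List (List (String × Option Int))) : Prop := out = get_imagenes_adicionales_alt full_imedic_data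
instance (full_imedic_data : List (List (String × Option Int))) (out : List (List (String × Option Int))) : Decidable (Spec_get_imagenes_adicionales full_imedic_data out) := by unfold Spec_get_imagenes_adicionales; infer_instance

-- ===== CLAIM (what is proved, stated in full; the proofs are below) =====
def Claim_equal_get_imagenes_adicionales : Prop := ∀ (full_imedic_data : List (List (String × Option Int))), Dom_get_imagenes_adicionales full_imedic_data → Spec_get_imagenes_adicionales full_imedic_data (get_imagenes_adicionales full_imedic_data)

-- ===== LEMMAS AND PROOFS =====

-- common model: the duplicates-by-type filter, carrying the list of already-seen types
def specRec (seen : List (Option Int)) : List (List (String × Option Int)) → List (List (String × Option Int))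
  | [] => []
  | r :: rs => if pvTipo r ∈ seen then r :: specRec seen rs else specRec (pvTipo r :: seen) rs

-- model of B's first pass: the first-occurrence indices of the suffix rs that starts at index k
def fIdx (seen : List (Option Int)) (k : Int) : List (List (String × Option Int)) → List Int
  | [] => []
  | r :: rs => if pvTipo r ∈ seen then fIdx seen (k+1) rs else k :: fIdx (pvTipo r :: seen) (k+1) rs

theorem fIdx_lb (rs : List (List (String × Option Int))) (seen : List (Option Int)) (k : Int) :
    ∀ i ∈ fIdx seen k rs, k ≤ i := by
  induction rs generalizing seen k with
  | nil => simp [fIdx]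
  | cons r rs ih =>
    intro i hi
    by_cases h : pvTipo r ∈ seen
    · simp only [fIdx, if_pos h] at hi
      have := ih seen (k+1) i hi
      omega
    · simp only [fIdx, if_neg h, List.mem_cons] at hi
      rcases hi with rfl | hi
      · omega
      · have := ih (pvTipo r :: seen) (k+1) i hi
        omega

theorem A_fold (rs : List (List (String × Option Int)))
    (acc : List (List (String × Option Int))) (S : PySem.Set (Option Int)) (seen : List (Option Int))
    (hS : ∀ t, t ∈ S ↔ t ∈ seen) :
    (rs.foldl
      (fun (st : List (List (String × Option Int)) × PySem.Set (Option Int)) registro =>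
        let tipo_id := pvTipo registro
        if PySem.Set.contains st.2 tipo_id then
          (st.1 ++ [registro], st.2)
        else
          (st.1, PySem.Set.add st.2 tipo_id))
      (acc, S)).1 = acc ++ specRec seen rs := by
  induction rs generalizing acc S seen with
  | nil => simp [specRec]
  | cons r rs ih =>
    by_cases h : pvTipo r ∈ seen
    · have hc : PySem.Set.contains S (pvTipo r) = true := by simp [hS]; exact h
      simp only [List.foldl_cons, hc, if_pos, specRec, if_pos h]
      rw [ih (acc ++ [r]) S seen hS]
      simp
    · have hc : PySem.Set.contains S (pvTipo r) = false := by simp [hS]; exact h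
      simp only [List.foldl_cons, hc, Bool.false_eq_true, if_false, specRec, if_neg h]
      exact ih acc (PySem.Set.add S (pvTipo r)) (pvTipo r :: seen)
        (by intro t; rw [PySem.Set.mem_add, hS]; simp [or_comm])

theorem B_first_pass (rs : List (List (String × Option Int)))
    (d : PySem.Dict (Option Int) Int) (k : Int) (seen : List (Option Int))
    (hd : ∀ t, PySem.Dict.contains d t = decide (t ∈ seen)) :
    ((PySem.List.enumerate rs k).foldl
        (fun d p => PySem.Dict.setdefault d (pvTipo p.2) p.1) d).values
      = d.values ++ fIdx seen k rs := by
  induction rs generalizing d k seen with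
  | nil => simp [PySem.List.enumerate_nil, fIdx]
  | cons r rs ih =>
    rw [PySem.List.enumerate_cons, List.foldl_cons]
    by_cases h : pvTipo r ∈ seen
    · have hc : PySem.Dict.contains d (pvTipo r) = true := by simp [hd, h]
      rw [PySem.Dict.setdefault_of_contains _ _ hc]
      simp only [fIdx, if_pos h]
      exact ih d (k+1) seen hd
    · have hc : PySem.Dict.contains d (pvTipo r) = false := by simp [hd, h]
      rw [PySem.Dict.setdefault_of_not_contains _ _ hc]
      simp only [fIdx, if_neg h]
      rw [ih (d.insert (pvTipo r) k) (k+1) (pvTipo r :: seen)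
          (by intro t; rw [PySem.Dict.contains_insert, hd]; by_cases ht : t = pvTipo r <;> simp [ht])]
      have : (d.insert (pvTipo r) k).values = d.values ++ [k] := by
        simp [PySem.Dict.values, PySem.Dict.items_insert_of_not_contains _ _ hc]
      rw [this]; simp

theorem B_second_pass (rs : List (List (String × Option Int)))
    (k : Int) (seen : List (Option Int)) (keep : PySem.Set Int)
    (acc : List (List (String × Option Int)))
    (hk : ∀ i : Int, k ≤ i → ((i ∈ keep) ↔ i ∈ fIdx seen k rs)) :
    (PySem.List.enumerate rs k).foldl
      (fun acc p => if !(PySem.Set.contains keep p.1) then acc ++ [p.2] else acc) acc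
    = acc ++ specRec seen rs := by
  induction rs generalizing k seen acc with
  | nil => simp [PySem.List.enumerate_nil, specRec]
  | cons r rs ih =>
    rw [PySem.List.enumerate_cons, List.foldl_cons]
    by_cases h : pvTipo r ∈ seen
    · have hmem : k ∉ fIdx seen k (r :: rs) := by
        simp only [fIdx, if_pos h]
        intro hc
        have := fIdx_lb rs seen (k+1) k hc
        omega
      have hc : PySem.Set.contains keep k = false := by
        simp [hk k le_rfl]; exact hmem
      simp only [hc, Bool.not_false, if_pos, specRec, if_pos h]
      rw [ih (k+1) seen (acc ++ [r])
          (by intro i hi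
              rw [hk i (by omega)]
              simp only [fIdx, if_pos h])]
      simp
    · have hmem : k ∈ fIdx seen k (r :: rs) := by
        simp [fIdx, if_neg h]
      have hc : PySem.Set.contains keep k = true := by
        simp [hk k le_rfl]; exact hmem
      simp only [hc, Bool.not_true, Bool.false_eq_true, if_false, specRec, if_neg h]
      refine ih (k+1) (pvTipo r :: seen) acc ?_
      intro i hi
      rw [hk i (by omega)]
      simp only [fIdx, if_neg h, List.mem_cons]
      have : ¬ i = k := by omega
      simp [this]

-- ===== VERDICT (by name: the statement is the Claim_ definition above) =====
theorem get_imagenes_adicionales_spec : Claim_equal_get_imagenes_adicionales := by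
  intro xs _
  unfold Spec_get_imagenes_adicionales
  simp only [get_imagenes_adicionales, get_imagenes_adicionales_alt]
  rw [A_fold xs [] PySem.Set.empty [] (by intro t; simp [PySem.Set.empty])]
  rw [B_second_pass xs 0 [] _ [] ?_]
  · intro i _
    rw [B_first_pass xs PySem.Dict.empty 0 [] (by intro t; simp)]
    simp [PySem.Set.mem_ofList, PySem.Dict.values, PySem.Dict.empty]
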